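-- pv_equiv track=rewrite | github.com/Smartappli/LLM_SERVER | services/medical_models.py | pick_preferred_file
-- ===== SOURCE A (Python) =====
-- def pick_preferred_file(files: list[str]) -> list[str]:
--     if not files:
--         return []
--
--     priorities = ["q4_k_m", "q4_k_s", "q5_k_m", "q8_0", "f16"]
--     lowered = {name.lower(): name for name in files}
--     for p in priorities:
--         for lower_name, original in lowered.items():
--             if p in lower_name:
--                 return [original]
--
--     return [files[0]]
-- ===== SOURCE B (Python) =====
-- def pick_preferred_file(files: list[str]) -> list[str]:
--     if not files:
--         return []
--
--     priorities = ["q4_k_m", "q4_k_s", "q5_k_m", "q8_0", "f16"]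
--     lowered = {}
--     for name in files:
--         lowered[name.lower()] = name
--
--     # single pass: keep the first entry with the smallest priority rank
--     best_rank = len(priorities)
--     best = files[0]
--     for low, orig in lowered.items():
--         rank = 0
--         for p in priorities:
--             if p in low:
--                 break
--             rank += 1
--         if rank < best_rank:
--             best_rank = rank
--             best = orig
--     return [best]
-- ===== Notes on version B (the rewrite author's own statement) =====
-- stated objective: alternative
-- what changed: A scans the deduped dict once per priority (priority-major nested loops, returning on the first hit); B makes a single pass over the dict items, computing each entry's priority rank and keeping the first entry with the smallest rank, initialised with files[0] so the all-miss case needs no separate path.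
import Mathlib
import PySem

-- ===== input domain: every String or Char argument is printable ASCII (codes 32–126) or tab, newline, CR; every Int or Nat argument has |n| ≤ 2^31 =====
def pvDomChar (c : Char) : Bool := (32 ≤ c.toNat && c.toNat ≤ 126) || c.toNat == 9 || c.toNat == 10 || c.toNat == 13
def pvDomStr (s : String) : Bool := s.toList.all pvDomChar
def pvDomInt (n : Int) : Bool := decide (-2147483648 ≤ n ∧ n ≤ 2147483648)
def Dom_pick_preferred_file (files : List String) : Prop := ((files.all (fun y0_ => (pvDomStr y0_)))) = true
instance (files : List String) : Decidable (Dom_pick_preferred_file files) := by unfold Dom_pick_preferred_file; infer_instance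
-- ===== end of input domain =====

-- B replaces A's priority-major nested scans by one rank-tracking pass over the dict items; objective: alternative decomposition (same cost).

-- ===== PORT A =====
-- outer loop 'for p in priorities' with inner 'for lower_name, original in lowered.items(): if p in lower_name: return [original]'
def pickSearchA : List String → List (String × String) → Option String
  | [], _ => none
  | p :: ps, items =>
    match items.find? (fun kv => PySem.Str.isIn p kv.1) with
    | some kv => some kv.2
    | none => pickSearchA ps items

def pick_preferred_file (files : List String) : List String :=
  match files with
  | [] => []
  | f0 :: _ =>
    let priorities : List String := ["q4_k_m", "q4_k_s", "q5_k_m", "q8_0", "f16"]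
    let lowered := files.foldl (fun d name => d.insert (PySem.Str.lower name) name) (PySem.Dict.empty : PySem.Dict String String)
    match pickSearchA priorities lowered.items with
    | some o => [o]
    | none => [f0]

-- ===== PORT B =====
-- 'rank = 0; for p in priorities: if p in low: break; rank += 1'
def pickRankB : List String → String → Nat
  | [], _ => 0
  | p :: ps, low => if PySem.Str.isIn p low then 0 else pickRankB ps low + 1

def pick_preferred_file_alt (files : List String) : List String :=
  match files with
  | [] => []
  | f0 :: _ =>
    let priorities : List String := ["q4_k_m", "q4_k_s", "q5_k_m", "q8_0", "f16"]
    let lowered := files.foldl (fun d name => d.insert (PySem.Str.lower name) name) (PySem.Dict.empty : PySem.Dict String String)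
    let res := lowered.items.foldl
      (fun (st : Nat × String) kv =>
        let r := pickRankB priorities kv.1
        if r < st.1 then (r, kv.2) else st)
      (priorities.length, f0)
    [res.2]

-- ===== PRECONDITION & SPEC =====
def Spec_pick_preferred_file (files : List String) (out : List String) : Prop := out = pick_preferred_file_alt files
instance (files : List String) (out : List String) : Decidable (Spec_pick_preferred_file files out) := by unfold Spec_pick_preferred_file; infer_instance

-- ===== CLAIM (what is proved, stated in full; the proofs are below) =====
def Claim_equal_pick_preferred_file : Prop := ∀ (files : List String), Dom_pick_preferred_file files → Spec_pick_preferred_file files (pick_preferred_file files)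

-- ===== LEMMAS AND PROOFS =====

-- the first element of L minimizing r (ties to the earlier element), none on []
def pickFirstMin {α : Type} (r : α → Nat) : List α → Option α
  | [] => none
  | x :: t =>
    match pickFirstMin r t with
    | none => some x
    | some m => if r m < r x then some m else some x

theorem pickFirstMin_mem {α : Type} (r : α → Nat) (L : List α) (m : α)
    (h : pickFirstMin r L = some m) : m ∈ L := by
  induction L with
  | nil => simp [pickFirstMin] at h
  | cons x t ih =>
    simp only [pickFirstMin] at h
    cases hT : pickFirstMin r t with
    | none => rw [hT] at h; simp at h; simp [h]
    | some m' =>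
      rw [hT] at h
      by_cases hc : r m' < r x
      · simp [hc] at h; subst h; exact List.mem_cons_of_mem _ (ih hT)
      · simp [hc] at h; simp [h]

-- characterization of B's fold
theorem pickFoldB_char (r : String × String → Nat) (L : List (String × String)) :
    ∀ (b : Nat) (f : String),
    L.foldl (fun (st : Nat × String) kv => let rv := r kv; if rv < st.1 then (rv, kv.2) else st) (b, f)
      = match pickFirstMin r L with
        | some m => if r m < b then (r m, m.2) else (b, f)
        | none => (b, f) := by
  induction L with
  | nil => intro b f; simp [pickFirstMin]
  | cons x t ih =>
    intro b f
    simp only [List.foldl_cons, pickFirstMin]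
    by_cases hx : r x < b
    · simp only [hx]
      rw [ih]
      cases hT : pickFirstMin r t with
      | none => simp [hx]
      | some m =>
        by_cases hm : r m < r x
        · simp [hm, lt_trans hm hx]
        · simp [hm, hx]
    · simp only [if_neg hx]
      rw [ih]
      cases hT : pickFirstMin r t with
      | none => simp [hx]
      | some m =>
        by_cases hm : r m < r x
        · simp [hm]
        · by_cases hmb : r m < b
          · exact absurd (lt_of_lt_of_le hmb (le_of_not_gt hx)) hm
          · simp [hm, hmb, hx]

-- find? for a Boolean-equal predicate
theorem pickFind_congr {α : Type} (p q : α → Bool) (L : List α) (h : ∀ x ∈ L, p x = q x) :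
    L.find? p = L.find? q := by
  induction L with
  | nil => rfl
  | cons x t ih =>
    simp only [List.find?]
    rw [h x (List.mem_cons_self)]
    cases q x
    · exact ih (fun y hy => h y (List.mem_cons_of_mem _ hy))
    · rfl

-- if the first element of rank 0 is kv, it is the first rank-minimal element
theorem pickFirstMin_of_find_zero {α : Type} (r : α → Nat) (L : List α) (kv : α)
    (h : L.find? (fun x => r x == 0) = some kv) : pickFirstMin r L = some kv := by
  induction L with
  | nil => simp at h
  | cons x t ih =>
    simp only [List.find?] at h
    by_cases hx : r x = 0
    · simp [hx] at h
      subst h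
      simp only [pickFirstMin]
      cases hT : pickFirstMin r t with
      | none => rfl
      | some m => simp [hx]
    · have hb : (r x == 0) = false := by simp [hx]
      rw [hb] at h
      have hT := ih h
      have hkv : r kv = 0 := by
        have := List.find?_some h
        simpa using this
      simp only [pickFirstMin, hT]
      have : r kv < r x := by omega
      simp [this]

-- shifting all ranks by one does not change the first minimum
theorem pickFirstMin_shift {α : Type} (r1 r2 : α → Nat) (L : List α)
    (h : ∀ x ∈ L, r1 x = r2 x + 1) : pickFirstMin r1 L = pickFirstMin r2 L := by
  induction L with
  | nil => rfl
  | cons x t ih =>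
    have ht : ∀ y ∈ t, r1 y = r2 y + 1 := fun y hy => h y (List.mem_cons_of_mem _ hy)
    simp only [pickFirstMin, ih ht]
    cases hT : pickFirstMin r2 t with
    | none => rfl
    | some m =>
      have hm : m ∈ t := pickFirstMin_mem r2 t m hT
      have e1 : r1 m = r2 m + 1 := ht m hm
      have e2 : r1 x = r2 x + 1 := h x (List.mem_cons_self)
      by_cases hc : r2 m < r2 x
      · have : r1 m < r1 x := by omega
        simp [hc, this]
      · have : ¬ r1 m < r1 x := by omega
        simp [hc, this]

-- characterization of A's search
theorem pickSearchA_char (ps : List String) (L : List (String × String)) :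
    pickSearchA ps L
      = match pickFirstMin (fun kv => pickRankB ps kv.1) L with
        | some m => if pickRankB ps m.1 < ps.length then some m.2 else none
        | none => none := by
  induction ps generalizing L with
  | nil =>
    cases hT : pickFirstMin (fun kv => pickRankB ([] : List String) kv.1) L with
    | none => simp [pickSearchA]
    | some m => simp [pickSearchA, pickRankB]
  | cons p tl ih =>
    simp only [pickSearchA]
    cases hF : L.find? (fun kv => PySem.Str.isIn p kv.1) with
    | some kv =>
      have hF' : L.find? (fun kv => pickRankB (p :: tl) kv.1 == 0) = some kv := by
        rw [← hF]
        apply pickFind_congr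
        intro x _
        cases hin : PySem.Chars.isIn p.toList x.1.toList <;>
          simp [pickRankB, PySem.Str.isIn, hin]
      have hFM := pickFirstMin_of_find_zero _ L kv hF'
      have hkv0 : pickRankB (p :: tl) kv.1 = 0 := by
        have := List.find?_some hF'
        simpa using this
      rw [hFM]
      simp [hkv0]
    | none =>
      have hAll : ∀ x ∈ L, PySem.Chars.isIn p.toList x.1.toList = false := by
        intro x hx
        have := List.find?_eq_none.mp hF x hx
        simpa [PySem.Str.isIn] using this
      have hShift : ∀ x ∈ L, pickRankB (p :: tl) x.1 = pickRankB tl x.1 + 1 := by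
        intro x hx
        simp [pickRankB, PySem.Str.isIn, hAll x hx]
      rw [pickFirstMin_shift _ _ L hShift, ih L]
      cases hT : pickFirstMin (fun kv => pickRankB tl kv.1) L with
      | none => rfl
      | some m =>
        have hm : m ∈ L := pickFirstMin_mem _ L m hT
        have e : pickRankB (p :: tl) m.1 = pickRankB tl m.1 + 1 := hShift m hm
        have hl : (p :: tl).length = tl.length + 1 := rfl
        show (if pickRankB tl m.1 < tl.length then some m.2 else none)
            = if pickRankB (p :: tl) m.1 < (p :: tl).length then some m.2 else none
        by_cases hc : pickRankB tl m.1 < tl.length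
        · have h2 : pickRankB (p :: tl) m.1 < (p :: tl).length := by omega
          rw [if_pos hc, if_pos h2]
        · have h2 : ¬ pickRankB (p :: tl) m.1 < (p :: tl).length := by omega
          rw [if_neg hc, if_neg h2]

-- ===== VERDICT (by name: the statement is the Claim_ definition above) =====
theorem pick_preferred_file_spec : Claim_equal_pick_preferred_file := by
  intro files _
  unfold Spec_pick_preferred_file pick_preferred_file pick_preferred_file_alt
  cases files with
  | nil => rfl
  | cons f0 rest =>
    simp only []
    rw [pickFoldB_char, pickSearchA_char]
    cases hT : pickFirstMin (fun kv => pickRankB ["q4_k_m", "q4_k_s", "q5_k_m", "q8_0", "f16"] kv.1)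
        ((((f0 :: rest).foldl (fun d name => d.insert (PySem.Str.lower name) name)
          (PySem.Dict.empty : PySem.Dict String String))).items) with
    | none => simp
    | some m =>
      by_cases hc : pickRankB ["q4_k_m", "q4_k_s", "q5_k_m", "q8_0", "f16"] m.1 < 5
      · simp [hc]
      · simp [hc]
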